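-- pv_equiv track=rewrite | github.com/zeunala/ProblemSolving | BOJ/2023.01-2023.03/S3_1972.py | isDUnique
-- ===== SOURCE A (Python) =====
-- def isDUnique(str, D): # D-쌍이 유일한지 여부 리턴
--     history = set()
--
--     for i in range(len(str) - 1 - D):
--         onePair = (str[i], str[i + 1 + D])
--         if onePair in history:
--             return False
--         history.add(onePair)
--
--     return True
-- ===== SOURCE B (Python) =====
-- def isDUnique(str, D):
--     n = len(str) - 1 - D
--     return all((str[i], str[i + 1 + D]) != (str[j], str[j + 1 + D])
--                for i in range(n) for j in range(i))
-- ===== Notes on version B (the rewrite author's own statement) =====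
-- stated objective: alternative
-- what changed: Replaces A's single scan with a mutable history set and early return False by a brute-force nested-quantifier check: every D-pair is compared against every earlier D-pair directly, with no auxiliary set at all.
-- outside the precondition, e.g. on isDUnique('aa', -2): A returns False, B returns False
import Mathlib
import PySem

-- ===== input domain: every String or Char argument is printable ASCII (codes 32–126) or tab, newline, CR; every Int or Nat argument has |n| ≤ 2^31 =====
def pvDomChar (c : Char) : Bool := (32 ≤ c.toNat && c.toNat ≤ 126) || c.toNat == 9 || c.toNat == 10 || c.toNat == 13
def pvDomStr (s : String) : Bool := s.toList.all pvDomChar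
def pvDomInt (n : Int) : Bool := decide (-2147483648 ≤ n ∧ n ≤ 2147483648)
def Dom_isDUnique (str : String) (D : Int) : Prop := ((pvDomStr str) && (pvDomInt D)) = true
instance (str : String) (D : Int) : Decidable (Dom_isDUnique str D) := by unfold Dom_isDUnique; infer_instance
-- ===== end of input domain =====

-- B drops A's mutable history set and early return entirely: it decides uniqueness by
-- brute force, comparing every D-pair against every earlier D-pair (objective: alternative).

-- ===== PORT A =====
-- the for-loop over range(len(str)-1-D) with the mutable 'history' set and the early 'return False'
def isDUniqueLoop (chars : List Char) (D : Int) : List Int → PySem.Set (Char × Char) → Bool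
  | [], _ => true
  | i :: rest, history =>
    match PySem.List.pyGet? chars i, PySem.List.pyGet? chars (i + 1 + D) with
    | some c1, some c2 =>
      if PySem.Set.contains history (c1, c2) then false
      else isDUniqueLoop chars D rest (PySem.Set.add history (c1, c2))
    | _, _ => false   -- IndexError: unreachable under Pre_isDUnique

def isDUnique (str : String) (D : Int) : Bool :=
  isDUniqueLoop str.toList D
    (PySem.List.pyRange 0 ((str.toList.length : Int) - 1 - D) 1) PySem.Set.empty

-- ===== PORT B =====
-- all((str[i], str[i+1+D]) != (str[j], str[j+1+D]) for i in range(n) for j in range(i))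
def isDUnique_alt (str : String) (D : Int) : Bool :=
  let chars := str.toList
  let n := (chars.length : Int) - 1 - D
  (PySem.List.pyRange 0 n 1).all (fun i =>
    (PySem.List.pyRange 0 i 1).all (fun j =>
      decide ((PySem.List.pyGetD chars i ' ', PySem.List.pyGetD chars (i + 1 + D) ' ') ≠
              (PySem.List.pyGetD chars j ' ', PySem.List.pyGetD chars (j + 1 + D) ' '))))

-- ===== PRECONDITION & SPEC =====
-- Pre_ excludes D ≤ -2: there Python reaches negative-index wraparound or an index past the
-- end, so A (and B) either raises IndexError or returns False only via wrapped pairs.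
def Pre_isDUnique (str : String) (D : Int) : Prop := -1 ≤ D
instance (str : String) (D : Int) : Decidable (Pre_isDUnique str D) := by unfold Pre_isDUnique; infer_instance

def pvWitness_isDUnique : String × Int := ("abc", 0)

def Spec_isDUnique (str : String) (D : Int) (out : Bool) : Prop := out = isDUnique_alt str D
instance (str : String) (D : Int) (out : Bool) : Decidable (Spec_isDUnique str D out) := by unfold Spec_isDUnique; infer_instance

-- ===== CLAIM (what is proved, stated in full; the proofs are below) =====
def Claim_equal_isDUnique : Prop := ∀ (str : String) (D : Int), Dom_isDUnique str D → Pre_isDUnique str D → Spec_isDUnique str D (isDUnique str D)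

-- ===== LEMMAS AND PROOFS =====

-- A's loop, restated on the list of pairs it would examine
def pairScan : List (Char × Char) → PySem.Set (Char × Char) → Bool
  | [], _ => true
  | p :: ps, h => if PySem.Set.contains h p then false else pairScan ps (PySem.Set.add h p)

theorem contains_iff (h : PySem.Set (Char × Char)) (p : Char × Char) :
    PySem.Set.contains h p = true ↔ p ∈ h := by
  simp [PySem.Set.contains]

-- A's loop equals pairScan on the pair list, whenever every index is in range
theorem loop_eq_pairScan (chars : List Char) (D : Int) (idxs : List Int)
    (hin : ∀ i ∈ idxs, PySem.Raise.InRange chars.length i ∧ PySem.Raise.InRange chars.length (i + 1 + D)) :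
    ∀ h : PySem.Set (Char × Char),
      isDUniqueLoop chars D idxs h =
        pairScan (idxs.map (fun i => (PySem.List.pyGetD chars i ' ', PySem.List.pyGetD chars (i + 1 + D) ' '))) h := by
  induction idxs with
  | nil => intro h; rfl
  | cons i rest ih =>
    intro h
    have h1 := (hin i (by simp)).1
    have h2 := (hin i (by simp)).2
    have g1 : PySem.List.pyGet? chars i = some (PySem.List.pyGetD chars i ' ') := by
      rcases Option.ne_none_iff_exists'.mp
        (by rw [Ne, PySem.List.pyGet?_eq_none_iff]; exact not_not_intro h1) with ⟨x, hx⟩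
      simp [PySem.List.pyGetD, hx]
    have g2 : PySem.List.pyGet? chars (i + 1 + D) = some (PySem.List.pyGetD chars (i + 1 + D) ' ') := by
      rcases Option.ne_none_iff_exists'.mp
        (by rw [Ne, PySem.List.pyGet?_eq_none_iff]; exact not_not_intro h2) with ⟨x, hx⟩
      simp [PySem.List.pyGetD, hx]
    simp only [isDUniqueLoop, g1, g2, List.map_cons, pairScan]
    split
    · rfl
    · exact ih (fun j hj => hin j (by simp [hj])) _

-- pairScan returns true iff the pair list is duplicate-free and disjoint from the history
theorem pairScan_true_iff (ps : List (Char × Char)) :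
    ∀ h : PySem.Set (Char × Char),
      pairScan ps h = true ↔ ps.Nodup ∧ ∀ p ∈ ps, p ∉ h := by
  induction ps with
  | nil => intro h; simp [pairScan]
  | cons p rest ih =>
    intro h
    by_cases hc : p ∈ h
    · have hct : PySem.Set.contains h p = true := (contains_iff h p).mpr hc
      simp only [pairScan, hct, if_true]
      constructor
      · intro hF; cases hF
      · rintro ⟨_, hall⟩; exact absurd hc (hall p (by simp))
    · have : PySem.Set.contains h p = false := by
        rw [← Bool.not_eq_true, contains_iff]; exact hc
      have hadd : PySem.Set.add h p = h ++ [p] := by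
        unfold PySem.Set.add; rw [this]; simp
      simp only [pairScan, this, Bool.false_eq_true, if_false, ih, hadd]
      constructor
      · rintro ⟨hn, hall⟩
        refine ⟨List.nodup_cons.mpr ⟨fun hm => (hall p hm) (by simp), hn⟩, fun q hq => ?_⟩
        rcases List.mem_cons.mp hq with rfl | hq'
        · exact hc
        · exact fun hqs => (hall q hq') (List.mem_append_left _ hqs)
      · rintro ⟨hn, hall⟩
        have hpn := (List.nodup_cons.mp hn).1
        refine ⟨(List.nodup_cons.mp hn).2, fun q hq hq2 => ?_⟩
        rcases List.mem_append.mp hq2 with hqs | hqp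
        · exact (hall q (List.mem_cons_of_mem _ hq)) hqs
        · exact hpn ((List.mem_singleton.mp hqp) ▸ hq)

-- on a strictly increasing list, Pairwise R is the same as the two-quantifier statement
theorem pairwise_iff_of_sorted {R : Int → Int → Prop} (l : List Int) (hs : l.Pairwise (· < ·)) :
    l.Pairwise R ↔ ∀ x ∈ l, ∀ y ∈ l, x < y → R x y := by
  induction l with
  | nil => simp
  | cons a t ih =>
    rw [List.pairwise_cons] at hs
    rw [List.pairwise_cons, ih hs.2]
    constructor
    · rintro ⟨ha, hrec⟩ x hx y hy hxy
      rcases List.mem_cons.mp hx with rfl | hx'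
      · rcases List.mem_cons.mp hy with rfl | hy'
        · omega
        · exact ha y hy'
      · rcases List.mem_cons.mp hy with rfl | hy'
        · exact absurd (hs.1 x hx') (by omega)
        · exact hrec x hx' y hy' hxy
    · intro hall
      refine ⟨fun y hy => hall a (by simp) y (by simp [hy]) (hs.1 y hy), ?_⟩
      intro x hx y hy hxy
      exact hall x (by simp [hx]) y (by simp [hy]) hxy

-- B returns true iff the list of D-pairs has no duplicates
theorem alt_true_iff (chars : List Char) (D n : Int) :
    ((PySem.List.pyRange 0 n 1).all (fun i =>
      (PySem.List.pyRange 0 i 1).all (fun j =>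
        decide ((PySem.List.pyGetD chars i ' ', PySem.List.pyGetD chars (i + 1 + D) ' ') ≠
                (PySem.List.pyGetD chars j ' ', PySem.List.pyGetD chars (j + 1 + D) ' '))))) = true ↔
      ((PySem.List.pyRange 0 n 1).map
        (fun i => (PySem.List.pyGetD chars i ' ', PySem.List.pyGetD chars (i + 1 + D) ' '))).Nodup := by
  rw [List.Nodup, List.pairwise_map,
    pairwise_iff_of_sorted _ (PySem.List.pairwise_lt_pyRange_one 0 n)]
  simp only [List.all_eq_true, decide_eq_true_eq, PySem.List.mem_pyRange_one]
  constructor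
  · intro hall x hx y hy hxy
    exact Ne.symm (hall y ⟨by omega, hy.2⟩ x ⟨hx.1, by omega⟩)
  · intro hall i hi j hj
    exact Ne.symm (hall j ⟨hj.1, by omega⟩ i ⟨by omega, hi.2⟩ hj.2)

-- ===== VERDICT (by name: the statement is the Claim_ definition above) =====
theorem isDUnique_spec : Claim_equal_isDUnique := by
  intro str D _ hpre
  unfold Spec_isDUnique isDUnique isDUnique_alt
  set chars := str.toList with hchars
  set idxs := PySem.List.pyRange 0 ((chars.length : Int) - 1 - D) 1 with hidxs
  have hin : ∀ i ∈ idxs, PySem.Raise.InRange chars.length i ∧ PySem.Raise.InRange chars.length (i + 1 + D) := by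
    intro i hi
    rw [hidxs, PySem.List.mem_pyRange_one] at hi
    unfold Pre_isDUnique at hpre
    constructor <;> constructor <;> omega
  rw [loop_eq_pairScan chars D idxs hin PySem.Set.empty]
  rw [Bool.eq_iff_iff, pairScan_true_iff, alt_true_iff, ← hidxs]
  simp [PySem.Set.empty]
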